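-- pv_equiv track=rewrite | github.com/eliottcassidy2000/math | 04-computation/omega_claw_free_test.py | is_perfect_spgt
-- ===== SOURCE A (Python) =====
-- from itertools import combinations
--
-- def has_odd_hole(adj_sets, m):
--     """Check for induced odd cycle of length >= 5."""
--     if m < 5:
--         return False
--     for length in range(5, min(m + 1, 12), 2):
--         for verts in combinations(range(m), length):
--             # Check each vertex has exactly 2 neighbors in the subset
--             ok = True
--             for v in verts:
--                 nbr_count = sum(1 for u in verts if u != v and u in adj_sets[v])
--                 if nbr_count != 2:
--                     ok = False
--                     break
--             if not ok:
--                 continue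
--             # Check connectivity
--             vis = {verts[0]}
--             stk = [verts[0]]
--             while stk:
--                 u = stk.pop()
--                 for w in verts:
--                     if w not in vis and w in adj_sets[u]:
--                         vis.add(w)
--                         stk.append(w)
--             if len(vis) == length:
--                 return True
--     return False
--
-- def is_perfect_spgt(adj_sets, m):
--     """Check perfectness via Strong Perfect Graph Theorem."""
--     if m <= 4:
--         return True
--     if has_odd_hole(adj_sets, m):
--         return False
--     # Check complement for odd holes (= odd antiholes in G)
--     comp = [set() for _ in range(m)]
--     for i in range(m):
--         for j in range(i + 1, m):
--             if j not in adj_sets[i]: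
--                 comp[i].add(j)
--                 comp[j].add(i)
--     return not has_odd_hole(comp, m)
-- ===== SOURCE B (Python) =====
-- def _reach_closure(adj, sub):
--     reach = {sub[0]}
--     for _ in range(len(sub)):
--         reach = reach | {w for w in sub if w not in reach and any(w in adj[u] for u in reach)}
--     return reach
--
-- def _good(adj, sub):
--     k = len(sub)
--     if k < 5 or k % 2 == 0:
--         return False
--     if any(sum(1 for u in sub if u != v and u in adj[v]) != 2 for v in sub):
--         return False
--     return len(_reach_closure(adj, sub)) == k
--
-- def _search(adj, sub, rem):
--     # include/exclude recursion over the remaining vertices, pruned at size 11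
--     if _good(adj, sub):
--         return True
--     if len(sub) == 11 or not rem:
--         return False
--     return _search(adj, sub + [rem[0]], rem[1:]) or _search(adj, sub, rem[1:])
--
-- def _odd_hole(adj, m):
--     return m >= 5 and _search(adj, [], list(range(m)))
--
-- def is_perfect_spgt(adj_sets, m):
--     if m <= 4:
--         return True
--     if _odd_hole(adj_sets, m):
--         return False
--     comp = [set() for _ in range(m)]
--     for i in range(m):
--         for j in range(i + 1, m):
--             if j not in adj_sets[i]:
--                 comp[i].add(j)
--                 comp[j].add(i)
--     return not _odd_hole(comp, m)
-- ===== Notes on version B (the rewrite author's own statement) =====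
-- stated objective: alternative
-- what changed: has_odd_hole's per-length itertools.combinations enumeration with a DFS-stack connectivity test is replaced by a single include/exclude recursion over the vertex list pruned at size 11 (testing each subset once for odd size 5..11) with connectivity decided by an iterated neighbourhood-closure fixpoint instead of an explicit stack.
-- outside the precondition, e.g. on is_perfect_spgt([{1, 4}, {0, 2}, {1, 3}, {2, 4}, {0, 3}], 6): A returns False, B returns False
import Mathlib
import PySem

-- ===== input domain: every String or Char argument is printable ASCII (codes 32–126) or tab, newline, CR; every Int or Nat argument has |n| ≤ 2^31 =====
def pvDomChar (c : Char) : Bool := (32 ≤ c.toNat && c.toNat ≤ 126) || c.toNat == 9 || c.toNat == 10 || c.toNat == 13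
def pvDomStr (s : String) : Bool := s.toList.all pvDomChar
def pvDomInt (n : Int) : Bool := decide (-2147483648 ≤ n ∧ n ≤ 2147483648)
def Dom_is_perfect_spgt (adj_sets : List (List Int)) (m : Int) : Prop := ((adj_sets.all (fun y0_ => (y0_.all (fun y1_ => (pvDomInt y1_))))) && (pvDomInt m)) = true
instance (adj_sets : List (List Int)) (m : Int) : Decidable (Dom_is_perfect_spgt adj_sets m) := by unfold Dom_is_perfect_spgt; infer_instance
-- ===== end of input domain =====

-- B replaces A's per-length itertools.combinations enumeration + DFS-stack connectivity test by an
-- include/exclude recursion over the vertices pruned at size 11, with connectivity decided by an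
-- iterated neighbourhood-closure; same return value on every input admitted by Pre_ (objective: alternative).

-- ===== PORT A =====

-- adj_sets[v]: under Pre_ every index v used is 0 ≤ v < m ≤ adj_sets.length, so getD is exact
def pvNbrs (adj : List (List Int)) (v : Int) : List Int := adj.getD v.toNat []

-- the 'nbr_count != 2 → ok = False; break' loop: all vertices have exactly 2 neighbours in verts
def pvDeg2 (adj : List (List Int)) (verts : List Int) : Bool :=
  verts.all (fun v => verts.countP (fun u => decide (u ≠ v) && (pvNbrs adj v).contains u) == 2)

-- one step of the inner 'for w in verts' loop of the DFS (vis is a Python set; stack top at head)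
def pvVisit (adj : List (List Int)) (u : Int) (p : List Int × List Int) (w : Int) : List Int × List Int :=
  if !p.1.contains w && (pvNbrs adj u).contains w then (PySem.Set.add p.1 w, w :: p.2) else p

-- the whole inner 'for w in verts' loop for one popped u
def pvExpand (adj : List (List Int)) (u : Int) (verts vis : List Int) : List Int × List Int :=
  verts.foldl (pvVisit adj u) (vis, [])

lemma pvCountP_strict (l : List Int) (p q : Int → Bool) (h : ∀ a ∈ l, p a → q a) (x : Int)
    (hx : x ∈ l) (hpx : p x = false) (hqx : q x = true) : l.countP p + 1 ≤ l.countP q := by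
  induction l with
  | nil => simp at hx
  | cons y ys ih =>
    simp only [List.countP_cons]
    rcases List.mem_cons.mp hx with hy | hy
    · subst hy
      have hmono := List.countP_mono_left (l := ys) (p := p) (q := q)
        (fun a ha hpa => h a (List.mem_cons_of_mem _ ha) hpa)
      simp [hpx, hqx]; omega
    · have := ih (fun a ha hpa => h a (List.mem_cons_of_mem _ ha) hpa) hy
      have hy2 : p y = true → q y = true := h y (List.mem_cons_self ..)
      cases hp : p y <;> cases hq : q y <;> simp_all <;> omega

lemma pvCountP_add_mem (verts vis : List Int) (w : Int) (hw : w ∈ verts)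
    (hv : vis.contains w = false) :
    verts.countP (fun x => !(List.contains (PySem.Set.add vis w) x)) + 1
      ≤ verts.countP (fun x => !vis.contains x) := by
  have hv' : w ∉ vis := by simpa using hv
  have hadd : PySem.Set.add vis w = vis ++ [w] := by simp [PySem.Set.add, hv']
  refine pvCountP_strict _ _ _ (fun a _ hpa => ?_) w hw ?_ ?_
  · rw [hadd] at hpa
    simp only [List.contains_append, Bool.not_or, Bool.and_eq_true] at hpa
    exact hpa.1
  · simp [hadd, List.contains_iff_mem]
  · simpa using hv

lemma pvVisit_measure_aux (adj : List (List Int)) (u : Int) (verts : List Int) :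
    ∀ (l : List Int), (∀ x ∈ l, x ∈ verts) → ∀ vis acc,
      2 * verts.countP (fun x => !(l.foldl (pvVisit adj u) (vis, acc)).1.contains x)
          + (l.foldl (pvVisit adj u) (vis, acc)).2.length
        ≤ 2 * verts.countP (fun x => !vis.contains x) + acc.length := by
  intro l
  induction l with
  | nil => intro _ vis acc; simp
  | cons w t ih =>
    intro hl vis acc
    simp only [List.foldl_cons, pvVisit]
    by_cases hc : (!vis.contains w && (pvNbrs adj u).contains w) = true
    · rw [if_pos hc]
      have hw : w ∈ verts := hl w (List.mem_cons_self ..)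
      have hv : vis.contains w = false := by
        rcases Bool.and_eq_true .. |>.mp hc with ⟨h1, _⟩
        simpa using h1
      have h1 := ih (fun x hx => hl x (List.mem_cons_of_mem _ hx)) (PySem.Set.add vis w) (w :: acc)
      have h2 := pvCountP_add_mem verts vis w hw hv
      simp only [List.length_cons] at h1
      omega
    · rw [if_neg hc]
      exact ih (fun x hx => hl x (List.mem_cons_of_mem _ hx)) vis acc

-- termination measure for the DFS loop: cited by pvDfs's decreasing_by
lemma pvExpand_measure (adj : List (List Int)) (u : Int) (verts vis : List Int) :
    2 * verts.countP (fun x => !(pvExpand adj u verts vis).1.contains x)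
        + (pvExpand adj u verts vis).2.length
      ≤ 2 * verts.countP (fun x => !vis.contains x) := by
  simpa using pvVisit_measure_aux adj u verts verts (fun x hx => hx) vis []

-- 'while stk: u = stk.pop(); for w in verts: …' (stack top kept at the head of the list)
def pvDfs (adj : List (List Int)) (verts : List Int) (vis stk : List Int) : List Int :=
  match stk with
  | [] => vis
  | u :: stk' =>
    pvDfs adj verts (pvExpand adj u verts vis).1 ((pvExpand adj u verts vis).2 ++ stk')
termination_by 2 * verts.countP (fun x => !vis.contains x) + stk.length
decreasing_by
  have h := pvExpand_measure adj u verts vis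
  simp only [List.length_append, List.length_cons] at h ⊢
  omega

def pvHasOddHole (adj : List (List Int)) (m : Int) : Bool :=
  if m < 5 then false
  else
    (PySem.List.pyRange 5 (min (m + 1) 12) 2).any (fun L =>
      (PySem.List.combinations (PySem.List.pyRange 0 m 1) L.toNat).any (fun verts =>
        -- verts is nonempty at every use (its length is L ≥ 5), so verts[0] = verts.headD 0
        pvDeg2 adj verts &&
          (pvDfs adj verts [verts.headD 0] [verts.headD 0]).length == L.toNat))

-- complement construction, line for line the same in A and in B (Source B copies it verbatim)
def pvSetAt (c : List (List Int)) (i : Int) (x : Int) : List (List Int) :=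
  c.set i.toNat (PySem.Set.add (c.getD i.toNat []) x)

def pvComp (adj : List (List Int)) (m : Int) : List (List Int) :=
  (PySem.List.pyRange 0 m 1).foldl (fun c i =>
    (PySem.List.pyRange (i + 1) m 1).foldl (fun c j =>
      if !(pvNbrs adj i).contains j then pvSetAt (pvSetAt c i j) j i else c) c)
    (List.replicate m.toNat [])

def is_perfect_spgt (adj_sets : List (List Int)) (m : Int) : Bool :=
  if m ≤ 4 then true
  else if pvHasOddHole adj_sets m then false
  else !pvHasOddHole (pvComp adj_sets m) m

-- ===== PORT B =====

-- reach | {w for w in sub if w not in reach and any(w in adj[u] for u in reach)}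
def pvStep (adj : List (List Int)) (sub reach : List Int) : List Int :=
  PySem.Set.union reach
    (PySem.Set.ofList (sub.filter (fun w =>
      !reach.contains w && reach.any (fun u => (pvNbrs adj u).contains w))))

-- 'for _ in range(len(sub)): reach = …'
def pvClosure (adj : List (List Int)) (sub : List Int) : Nat → List Int → List Int
  | 0, reach => reach
  | k + 1, reach => pvClosure adj sub k (pvStep adj sub reach)

def pvGood (adj : List (List Int)) (sub : List Int) : Bool :=
  if sub.length < 5 || sub.length % 2 == 0 then false
  else if sub.any (fun v =>
      !(sub.countP (fun u => decide (u ≠ v) && (pvNbrs adj v).contains u) == 2)) then false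
  -- sub[0] = sub.headD 0: sub is nonempty here since 5 ≤ len(sub)
  else (pvClosure adj sub sub.length [sub.headD 0]).length == sub.length

-- include/exclude recursion over the remaining vertices, pruned at size 11
def pvSearch (adj : List (List Int)) : List Int → List Int → Bool
  | sub, [] => pvGood adj sub
  | sub, v :: rest =>
    if pvGood adj sub then true
    else if sub.length == 11 then false
    else pvSearch adj (sub ++ [v]) rest || pvSearch adj sub rest

def pvOddHoleAlt (adj : List (List Int)) (m : Int) : Bool :=
  decide (5 ≤ m) && pvSearch adj [] (PySem.List.pyRange 0 m 1)

def is_perfect_spgt_alt (adj_sets : List (List Int)) (m : Int) : Bool :=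
  if m ≤ 4 then true
  else if pvOddHoleAlt adj_sets m then false
  else !pvOddHoleAlt (pvComp adj_sets m) m

-- ===== PRECONDITION & SPEC =====
-- Pre_ excludes inputs with fewer than m adjacency rows (for m ≥ 5): on those A raises IndexError,
-- except when an odd hole among the existing rows happens to be found before the first
-- out-of-range access (then both programs return early with the same value; cite in claim.json).
def Pre_is_perfect_spgt (adj_sets : List (List Int)) (m : Int) : Prop :=
  m ≤ 4 ∨ m ≤ (adj_sets.length : Int)
instance (adj_sets : List (List Int)) (m : Int) : Decidable (Pre_is_perfect_spgt adj_sets m) := by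
  unfold Pre_is_perfect_spgt; infer_instance

def pvWitness_is_perfect_spgt : List (List Int) × Int := ([[1, 4], [0, 2], [1, 3], [2, 4], [3, 0]], 5)

def Spec_is_perfect_spgt (adj_sets : List (List Int)) (m : Int) (out : Bool) : Prop :=
  out = is_perfect_spgt_alt adj_sets m
instance (adj_sets : List (List Int)) (m : Int) (out : Bool) :
    Decidable (Spec_is_perfect_spgt adj_sets m out) := by
  unfold Spec_is_perfect_spgt; infer_instance

-- ===== CLAIM (what is proved, stated in full; the proofs are below) =====
def Claim_equal_is_perfect_spgt : Prop := ∀ (adj_sets : List (List Int)) (m : Int), Dom_is_perfect_spgt adj_sets m → Pre_is_perfect_spgt adj_sets m → Spec_is_perfect_spgt adj_sets m (is_perfect_spgt adj_sets m)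

-- ===== LEMMAS AND PROOFS =====

-- reachability from a inside the vertex list verts along w ∈ adj[u] edges
inductive pvReach (adj : List (List Int)) (verts : List Int) (a : Int) : Int → Prop
  | refl : pvReach adj verts a a
  | step {u w : Int} : pvReach adj verts a u → w ∈ verts →
      (pvNbrs adj u).contains w = true → pvReach adj verts a w

-- the common characterisation both hole tests are proved equal to
def pvHoleProp (adj : List (List Int)) (m : Int) : Prop :=
  ∃ s : List Int, s.Sublist (PySem.List.pyRange 0 m 1) ∧
    5 ≤ s.length ∧ s.length ≤ 11 ∧ s.length % 2 = 1 ∧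
    pvDeg2 adj s = true ∧ (∀ x ∈ s, pvReach adj s (s.headD 0) x)

-- two nodup lists, one inside the other: equal lengths = equal membership
lemma pvCard_iff (r s : List Int) (hr : r.Nodup) (hs : s.Nodup) (hsub : ∀ x ∈ r, x ∈ s) :
    r.length = s.length ↔ ∀ x ∈ s, x ∈ r := by
  have hsp : r.Subperm s := List.subperm_of_subset hr hsub
  constructor
  · intro hlen x hx
    exact ((hsp.perm_of_length_le (by omega)).mem_iff).mpr hx
  · intro hall
    have hsp2 : s.Subperm r := List.subperm_of_subset hs hall
    have := hsp.length_le
    have := hsp2.length_le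
    omega

lemma pvReach_mem (adj : List (List Int)) (s : List Int) (a x : Int) (ha : a ∈ s)
    (h : pvReach adj s a x) : x ∈ s := by
  induction h with
  | refl => exact ha
  | step _ hw _ => exact hw

lemma pvHead_mem (s : List Int) (h : s ≠ []) : s.headD 0 ∈ s := by
  cases s with
  | nil => simp at h
  | cons y t => simp

-- ---- the DFS of A computes exactly the reachable set ----

lemma pvExpand_spec_aux (adj : List (List Int)) (u : Int) :
    ∀ (l : List Int), ∀ (vis acc : List Int),
      (∀ x, x ∈ (l.foldl (pvVisit adj u) (vis, acc)).1 ↔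
          x ∈ vis ∨ (x ∈ l ∧ (pvNbrs adj u).contains x = true)) ∧
      (∀ x, x ∈ (l.foldl (pvVisit adj u) (vis, acc)).2 ↔
          x ∈ acc ∨ (x ∈ (l.foldl (pvVisit adj u) (vis, acc)).1 ∧ x ∉ vis)) ∧
      (vis.Nodup → (l.foldl (pvVisit adj u) (vis, acc)).1.Nodup) := by
  intro l
  induction l with
  | nil =>
    intro vis acc
    refine ⟨by simp, fun x => ?_, fun h => h⟩
    simp only [List.foldl_nil]
    tauto
  | cons w t ih =>
    intro vis acc
    simp only [List.foldl_cons, pvVisit]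
    by_cases hc : (!vis.contains w && (pvNbrs adj u).contains w) = true
    · have hv : vis.contains w = false := by
        rcases Bool.and_eq_true .. |>.mp hc with ⟨h1, _⟩; simpa using h1
      have he : (pvNbrs adj u).contains w = true := (Bool.and_eq_true .. |>.mp hc).2
      have hv' : w ∉ vis := by simpa using hv
      have hadd : PySem.Set.add vis w = vis ++ [w] := by simp [PySem.Set.add, hv']
      rw [if_pos hc, hadd]
      obtain ⟨ih1, ih2, ih3⟩ := ih (vis ++ [w]) (w :: acc)
      refine ⟨fun x => ?_, fun x => ?_, fun hnd => ?_⟩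
      · rw [ih1]
        simp only [List.mem_append, List.mem_singleton, List.mem_cons, List.not_mem_nil, or_false]
        constructor
        · rintro ((h | h) | h)
          · exact Or.inl h
          · subst h; exact Or.inr ⟨Or.inl rfl, he⟩
          · exact Or.inr ⟨Or.inr h.1, h.2⟩
        · rintro (h | ⟨h | h, hE⟩)
          · exact Or.inl (Or.inl h)
          · subst h; exact Or.inl (Or.inr rfl)
          · exact Or.inr ⟨h, hE⟩
      · have hw1 : w ∈ (t.foldl (pvVisit adj u) (vis ++ [w], w :: acc)).1 :=
          (ih1 w).mpr (Or.inl (by simp))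
        rw [ih2]
        simp only [List.mem_cons]
        constructor
        · rintro (h | h)
          · rcases h with h | h
            · subst h; exact Or.inr ⟨hw1, hv'⟩
            · exact Or.inl h
          · refine Or.inr ⟨h.1, fun hx => h.2 (List.mem_append.mpr (Or.inl hx))⟩
        · rintro (h | ⟨h1, h2⟩)
          · exact Or.inl (Or.inr h)
          · by_cases hxw : x = w
            · exact Or.inl (Or.inl hxw)
            · refine Or.inr ⟨h1, fun hx => ?_⟩
              rcases List.mem_append.mp hx with hx | hx
              · exact h2 hx
              · exact hxw (by simpa using hx)
      · refine ih3 (List.Nodup.append hnd (List.nodup_singleton w) ?_)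
        simp [List.disjoint_singleton, hv']
    · have hor : vis.contains w = true ∨ (pvNbrs adj u).contains w = false := by
        by_cases h1 : vis.contains w = true
        · exact Or.inl h1
        · right
          have h1' : (!vis.contains w) = true := by simpa using h1
          cases h2 : (pvNbrs adj u).contains w
          · rfl
          · exact absurd (by rw [h1', h2]; rfl) hc
      rw [if_neg hc]
      obtain ⟨ih1, ih2, ih3⟩ := ih vis acc
      refine ⟨fun x => ?_, ih2, ih3⟩
      rw [ih1]
      simp only [List.mem_cons]
      constructor
      · rintro (h | h)
        · exact Or.inl h
        · exact Or.inr ⟨Or.inr h.1, h.2⟩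
      · rintro (h | ⟨h | h, hE⟩)
        · exact Or.inl h
        · subst h
          rcases hor with h2 | h2
          · exact Or.inl (by simpa using h2)
          · rw [h2] at hE; cases hE
        · exact Or.inr ⟨h, hE⟩

lemma pvExpand_spec (adj : List (List Int)) (u : Int) (verts vis : List Int) :
    (∀ x, x ∈ (pvExpand adj u verts vis).1 ↔
        x ∈ vis ∨ (x ∈ verts ∧ (pvNbrs adj u).contains x = true)) ∧
    (∀ x, x ∈ (pvExpand adj u verts vis).2 ↔ x ∈ (pvExpand adj u verts vis).1 ∧ x ∉ vis) ∧
    (vis.Nodup → (pvExpand adj u verts vis).1.Nodup) := by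
  obtain ⟨h1, h2, h3⟩ := pvExpand_spec_aux adj u verts vis []
  exact ⟨h1, fun x => by rw [pvExpand, h2]; simp, h3⟩

lemma pvDfs_spec (adj : List (List Int)) (verts : List Int) (a : Int) :
    ∀ vis stk, (∀ x ∈ stk, x ∈ vis) → (∀ x ∈ vis, pvReach adj verts a x) →
      (∀ x ∈ vis, x ∉ stk → ∀ w ∈ verts, (pvNbrs adj x).contains w = true → w ∈ vis) →
      vis.Nodup → a ∈ vis →
      (∀ x, x ∈ pvDfs adj verts vis stk ↔ pvReach adj verts a x) ∧
        (pvDfs adj verts vis stk).Nodup := by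
  intro vis stk
  induction vis, stk using pvDfs.induct adj verts with
  | case1 vis =>
    intro hstk hreach hclosed hnd ha
    simp only [pvDfs]
    refine ⟨fun x => ⟨fun hx => hreach x hx, fun hr => ?_⟩, hnd⟩
    induction hr with
    | refl => exact ha
    | step hru hw hE ihr => exact hclosed _ ihr (by simp) _ hw hE
  | case2 vis u stk' ih =>
    intro hstk hreach hclosed hnd ha
    obtain ⟨e1, e2, e3⟩ := pvExpand_spec adj u verts vis
    have hu : u ∈ vis := hstk u (by simp)
    have hstk' : ∀ x ∈ (pvExpand adj u verts vis).2 ++ stk', x ∈ (pvExpand adj u verts vis).1 := by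
      intro x hx
      rcases List.mem_append.mp hx with hx | hx
      · exact ((e2 x).mp hx).1
      · exact (e1 x).mpr (Or.inl (hstk x (List.mem_cons_of_mem _ hx)))
    have hreach' : ∀ x ∈ (pvExpand adj u verts vis).1, pvReach adj verts a x := by
      intro x hx
      rcases (e1 x).mp hx with hx | ⟨hv, hE⟩
      · exact hreach x hx
      · exact pvReach.step (hreach u hu) hv hE
    have hclosed' : ∀ x ∈ (pvExpand adj u verts vis).1, x ∉ (pvExpand adj u verts vis).2 ++ stk' →
        ∀ w ∈ verts, (pvNbrs adj x).contains w = true → w ∈ (pvExpand adj u verts vis).1 := by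
      intro x hx hnx w hw hE'
      by_cases hxv : x ∈ vis
      · by_cases hxu : x = u
        · subst hxu; exact (e1 w).mpr (Or.inr ⟨hw, hE'⟩)
        · have hnstk : x ∉ (u :: stk') := by
            intro hmem
            rcases List.mem_cons.mp hmem with h | h
            · exact hxu h
            · exact hnx (List.mem_append.mpr (Or.inr h))
          exact (e1 w).mpr (Or.inl (hclosed x hxv hnstk w hw hE'))
      · exact absurd (List.mem_append.mpr (Or.inl ((e2 x).mpr ⟨hx, hxv⟩))) hnx
    have := ih hstk' hreach' hclosed' (e3 hnd) ((e1 a).mpr (Or.inl ha))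
    simpa only [pvDfs] using this

lemma pvDfs_reach (adj : List (List Int)) (s : List Int) (a : Int) (ha : a ∈ s)
    (hnd : s.Nodup) :
    (pvDfs adj s [a] [a]).length = s.length ↔ ∀ x ∈ s, pvReach adj s a x := by
  obtain ⟨hmem, hndr⟩ := pvDfs_spec adj s a [a] [a]
    (by intro x hx; simpa using hx)
    (by intro x hx; simp at hx; subst hx; exact pvReach.refl)
    (by intro x hx hnx; simp at hx; subst hx; simp at hnx)
    (List.nodup_singleton a)
    (by simp)
  have hsub : ∀ x ∈ pvDfs adj s [a] [a], x ∈ s := by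
    intro x hx
    exact pvReach_mem adj s a x ha ((hmem x).mp hx)
  rw [pvCard_iff _ _ hndr hnd hsub]
  constructor
  · intro h x hx
    exact (hmem x).mp (h x hx)
  · intro h x hx
    exact (hmem x).mpr (h x hx)

-- ---- the iterated closure of B computes exactly the reachable set ----

lemma pvUnion_prefix (s t : List Int) : ∃ d, PySem.Set.union s t = s ++ d := by
  induction t generalizing s with
  | nil => exact ⟨[], by rw [List.append_nil]; rfl⟩
  | cons y ys ih =>
    have h1 : PySem.Set.union s (y :: ys) = PySem.Set.union (PySem.Set.add s y) ys := rfl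
    rcases ih (PySem.Set.add s y) with ⟨d, hd⟩
    by_cases hc : y ∈ s
    · refine ⟨d, ?_⟩
      rw [h1, hd]
      simp [PySem.Set.add, hc]
    · refine ⟨y :: d, ?_⟩
      rw [h1, hd]
      simp [PySem.Set.add, hc]

lemma pvStep_prefix (adj : List (List Int)) (sub reach : List Int) :
    ∃ d, pvStep adj sub reach = reach ++ d := by
  exact pvUnion_prefix reach _

lemma pvStep_mem (adj : List (List Int)) (sub reach : List Int) (x : Int) :
    x ∈ pvStep adj sub reach ↔
      x ∈ reach ∨ (x ∈ sub ∧ reach.any (fun u => (pvNbrs adj u).contains x) = true) := by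
  simp only [pvStep, pysem, List.mem_filter, Bool.and_eq_true, Bool.not_eq_true',
    List.contains_iff_mem, decide_eq_false_iff_not]
  constructor
  · rintro (h | ⟨h1, _, h3⟩)
    · exact Or.inl h
    · exact Or.inr ⟨h1, h3⟩
  · rintro (h | ⟨h1, h3⟩)
    · exact Or.inl h
    · by_cases hr : x ∈ reach
      · exact Or.inl hr
      · exact Or.inr ⟨h1, by simpa using hr, h3⟩

lemma pvStep_nodup (adj : List (List Int)) (sub reach : List Int) (h : reach.Nodup) :
    (pvStep adj sub reach).Nodup := by
  simp [pvStep, pysem, h]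

def pvClosed (adj : List (List Int)) (sub C : List Int) : Prop :=
  ∀ x ∈ sub, C.any (fun u => (pvNbrs adj u).contains x) = true → x ∈ C

lemma pvStep_fix (adj : List (List Int)) (sub reach : List Int)
    (h : pvStep adj sub reach = reach) : pvClosed adj sub reach := by
  intro x hx hany
  have := pvStep_mem adj sub reach x
  rw [h] at this
  exact this.mpr (Or.inr ⟨hx, hany⟩)

lemma pvClosure_of_fix (adj : List (List Int)) (sub reach : List Int)
    (h : pvStep adj sub reach = reach) : ∀ k, pvClosure adj sub k reach = reach := by
  intro k
  induction k with
  | zero => rfl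
  | succ n ihn => simp only [pvClosure, h, ihn]

lemma pvClosure_closed (adj : List (List Int)) (sub : List Int) (hnd : sub.Nodup) :
    ∀ (k : Nat) (reach : List Int), reach.Nodup → (∀ x ∈ reach, x ∈ sub) →
      sub.length + 1 ≤ reach.length + k →
      pvClosed adj sub (pvClosure adj sub k reach) := by
  intro k
  induction k with
  | zero =>
    intro reach hrnd hrsub hlen
    have : reach.Subperm sub := List.subperm_of_subset hrnd hrsub
    have := this.length_le
    omega
  | succ n ihn =>
    intro reach hrnd hrsub hlen
    by_cases hf : pvStep adj sub reach = reach
    · have hstable : pvClosure adj sub (n + 1) reach = reach := pvClosure_of_fix adj sub reach hf (n + 1)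
      rw [hstable]
      exact pvStep_fix adj sub reach hf
    · rcases pvStep_prefix adj sub reach with ⟨d, hd⟩
      have hdne : d ≠ [] := by
        intro h0
        exact hf (by rw [hd, h0, List.append_nil])
      have hlen2 : reach.length + 1 ≤ (pvStep adj sub reach).length := by
        rw [hd, List.length_append]
        have := List.length_pos_iff.mpr hdne
        omega
      have hsub2 : ∀ x ∈ pvStep adj sub reach, x ∈ sub := by
        intro x hx
        rcases (pvStep_mem adj sub reach x).mp hx with hx | hx
        · exact hrsub x hx
        · exact hx.1
      have := ihn (pvStep adj sub reach) (pvStep_nodup adj sub reach hrnd) hsub2 (by omega)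
      simpa only [pvClosure] using this

lemma pvClosure_sound (adj : List (List Int)) (sub : List Int) (a : Int) :
    ∀ (k : Nat) (reach : List Int), (∀ x ∈ reach, pvReach adj sub a x) →
      ∀ x ∈ pvClosure adj sub k reach, pvReach adj sub a x := by
  intro k
  induction k with
  | zero => exact fun reach h x hx => h x hx
  | succ n ihn =>
    intro reach h x hx
    refine ihn (pvStep adj sub reach) ?_ x (by simpa only [pvClosure] using hx)
    intro y hy
    rcases (pvStep_mem adj sub reach y).mp hy with hy | ⟨hy1, hy2⟩
    · exact h y hy
    · rcases List.any_eq_true.mp hy2 with ⟨u, hu, hE⟩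
      exact pvReach.step (h u hu) hy1 hE

lemma pvClosure_mono (adj : List (List Int)) (sub : List Int) :
    ∀ (k : Nat) (reach : List Int) (x : Int), x ∈ reach → x ∈ pvClosure adj sub k reach := by
  intro k
  induction k with
  | zero => exact fun reach x hx => hx
  | succ n ihn =>
    intro reach x hx
    have hx2 : x ∈ pvStep adj sub reach := (pvStep_mem adj sub reach x).mpr (Or.inl hx)
    simpa only [pvClosure] using ihn (pvStep adj sub reach) x hx2

lemma pvClosure_nodup (adj : List (List Int)) (sub : List Int) :
    ∀ (k : Nat) (reach : List Int), reach.Nodup → (pvClosure adj sub k reach).Nodup := by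
  intro k
  induction k with
  | zero => exact fun reach h => h
  | succ n ihn =>
    intro reach h
    simpa only [pvClosure] using ihn (pvStep adj sub reach) (pvStep_nodup adj sub reach h)

lemma pvClosure_reach (adj : List (List Int)) (s : List Int) (a : Int) (ha : a ∈ s)
    (hnd : s.Nodup) :
    (pvClosure adj s s.length [a]).length = s.length ↔ ∀ x ∈ s, pvReach adj s a x := by
  have hsound := pvClosure_sound adj s a s.length [a]
    (by intro x hx; simp at hx; subst hx; exact pvReach.refl)
  have hclosed : pvClosed adj s (pvClosure adj s s.length [a]) :=
    pvClosure_closed adj s hnd s.length [a] (List.nodup_singleton a)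
      (by intro x hx; simp at hx; subst hx; exact ha) (by simp)
  have hcomplete : ∀ x, pvReach adj s a x → x ∈ pvClosure adj s s.length [a] := by
    intro x hx
    induction hx with
    | refl => exact pvClosure_mono adj s s.length [a] a (by simp)
    | step hru hw hE ihr => exact hclosed _ hw (List.any_eq_true.mpr ⟨_, ihr, hE⟩)
  have hndr := pvClosure_nodup adj s s.length [a] (List.nodup_singleton a)
  have hsub : ∀ x ∈ pvClosure adj s s.length [a], x ∈ s := by
    intro x hx
    exact pvReach_mem adj s a x ha (hsound x hx)
  rw [pvCard_iff _ _ hndr hnd hsub]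
  constructor
  · intro h x hx
    exact hsound x (h x hx)
  · intro h x hx
    exact hcomplete x (h x hx)

-- ---- B's pruned include/exclude recursion tests exactly the subsets of size ≤ 11 ----

lemma pvSearch_iff (adj : List (List Int)) :
    ∀ (rem sub : List Int), sub.length ≤ 11 →
      (pvSearch adj sub rem = true ↔
        ∃ s : List Int, s.Sublist rem ∧ sub.length + s.length ≤ 11 ∧
          pvGood adj (sub ++ s) = true) := by
  intro rem
  induction rem with
  | nil =>
    intro sub h11
    simp only [pvSearch]
    constructor
    · intro hg
      exact ⟨[], List.Sublist.refl _, by simpa using h11, by rwa [List.append_nil]⟩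
    · rintro ⟨t, ht, _, hg⟩
      rw [List.sublist_nil.mp ht, List.append_nil] at hg
      exact hg
  | cons v rest ih =>
    intro sub h11
    simp only [pvSearch]
    by_cases hg : pvGood adj sub = true
    · rw [if_pos hg]
      constructor
      · intro _
        exact ⟨[], List.nil_sublist _, by simpa using h11, by rwa [List.append_nil]⟩
      · intro _; rfl
    · rw [if_neg hg]
      by_cases h11' : sub.length = 11
      · rw [if_pos (by simp [h11'])]
        constructor
        · intro h; cases h
        · rintro ⟨t, ht, hlen, hgood⟩
          cases t with
          | nil => rw [List.append_nil] at hgood; exact absurd hgood hg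
          | cons y ys => simp only [List.length_cons] at hlen; omega
      · rw [if_neg (by simp [h11'])]
        have hlen1 : (sub ++ [v]).length ≤ 11 := by
          simp only [List.length_append, List.length_cons, List.length_nil]
          omega
        rw [Bool.or_eq_true, ih (sub ++ [v]) hlen1, ih sub h11]
        constructor
        · rintro (⟨t, ht, hlen, hgood⟩ | ⟨t, ht, hlen, hgood⟩)
          · refine ⟨v :: t, ht.cons₂ v, ?_, ?_⟩
            · simp only [List.length_append, List.length_cons, List.length_nil] at hlen ⊢
              omega
            · rw [List.append_cons]; exact hgood
          · exact ⟨t, ht.cons v, hlen, hgood⟩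
        · rintro ⟨t, ht, hlen, hgood⟩
          rcases List.sublist_cons_iff.mp ht with ht' | ⟨r, rfl, hr⟩
          · exact Or.inr ⟨t, ht', hlen, hgood⟩
          · refine Or.inl ⟨r, hr, ?_, ?_⟩
            · simp only [List.length_append, List.length_cons, List.length_nil] at hlen ⊢
              omega
            · rw [← List.append_cons]; exact hgood

-- ---- both hole tests decide pvHoleProp ----

lemma pvRange_lengths (m : Int) (h : 5 ≤ m) :
    PySem.List.pyRange 5 (min (m + 1) 12) 2 = [5, 7, 9, 11].filter (fun L => decide (L ≤ m)) := by
  rcases (by omega : m ≤ 10 ∨ 11 ≤ m) with hm | hm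
  · interval_cases m <;> decide
  · have h12 : min (m + 1) 12 = 12 := min_eq_right (by omega)
    rw [h12]
    have h1 : PySem.List.pyRange 5 12 2 = [5, 7, 9, 11] := by decide
    rw [h1]
    have h5 : ((5 : Int) ≤ m) := by omega
    have h7 : ((7 : Int) ≤ m) := by omega
    have h9 : ((9 : Int) ≤ m) := by omega
    have h11 : ((11 : Int) ≤ m) := by omega
    simp [List.filter, h5, h7, h9, h11]

lemma pvHoleProp_ge (adj : List (List Int)) (m : Int) (h : pvHoleProp adj m) : 5 ≤ m := by
  obtain ⟨s, hsub, h5, -, -, -, -⟩ := h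
  have := hsub.length_le
  rw [PySem.List.length_pyRange_one] at this
  omega

lemma pvGood_iff (adj : List (List Int)) (s : List Int) (hnd : s.Nodup) :
    pvGood adj s = true ↔
      5 ≤ s.length ∧ s.length % 2 = 1 ∧ pvDeg2 adj s = true ∧
        ∀ x ∈ s, pvReach adj s (s.headD 0) x := by
  unfold pvGood
  split_ifs with h1 h2
  · simp only [Bool.false_eq_true, false_iff]
    rintro ⟨ha, hb, -, -⟩
    simp only [Bool.or_eq_true, decide_eq_true_eq, beq_iff_eq] at h1
    omega
  · simp only [Bool.false_eq_true, false_iff]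
    rintro ⟨-, -, hdeg, -⟩
    rcases List.any_eq_true.mp h2 with ⟨v, hv, hbad⟩
    have := List.all_eq_true.mp hdeg v hv
    simp only [this] at hbad
    cases hbad
  · rw [beq_iff_eq]
    simp only [Bool.or_eq_true, decide_eq_true_eq, beq_iff_eq, not_or] at h1
    have h5 : 5 ≤ s.length := by omega
    have hodd : s.length % 2 = 1 := by omega
    have hne : s ≠ [] := by
      intro h
      rw [h] at h5
      simp at h5
    have hdeg : pvDeg2 adj s = true := by
      unfold pvDeg2
      rw [List.all_eq_true]
      intro v hv
      by_contra hbad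
      exact h2 (List.any_eq_true.mpr ⟨v, hv, by simpa using hbad⟩)
    rw [pvClosure_reach adj s _ (pvHead_mem s hne) hnd]
    constructor
    · intro hconn
      exact ⟨h5, hodd, hdeg, hconn⟩
    · rintro ⟨-, -, -, hconn⟩
      exact hconn

lemma pvHoleA_iff (adj : List (List Int)) (m : Int) :
    pvHasOddHole adj m = true ↔ pvHoleProp adj m := by
  unfold pvHasOddHole
  by_cases hm : m < 5
  · rw [if_pos hm]
    simp only [Bool.false_eq_true, false_iff]
    intro h
    have := pvHoleProp_ge adj m h
    omega
  · rw [if_neg hm]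
    have h5m : 5 ≤ m := by omega
    rw [pvRange_lengths m h5m, List.any_eq_true]
    constructor
    · rintro ⟨L, hLmem, hin⟩
      rw [List.any_eq_true] at hin
      obtain ⟨verts, hvmem, hacc⟩ := hin
      rw [List.mem_filter] at hLmem
      obtain ⟨hL4, hLm⟩ := hLmem
      obtain ⟨hsub, hlen⟩ := (PySem.List.mem_combinations_iff _ _ _).mp hvmem
      rw [Bool.and_eq_true, beq_iff_eq] at hacc
      obtain ⟨hdeg, hconn⟩ := hacc
      have hnd := hsub.nodup (PySem.List.nodup_pyRange_one 0 m)
      have hL5 : 5 ≤ L.toNat ∧ L.toNat ≤ 11 ∧ L.toNat % 2 = 1 := by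
        simp only [List.mem_cons, List.not_mem_nil, or_false] at hL4
        rcases hL4 with rfl | rfl | rfl | rfl <;> refine ⟨by decide, by decide, by decide⟩
      have hne : verts ≠ [] := by
        intro h
        rw [h] at hlen
        simp only [List.length_nil] at hlen
        omega
      rw [← hlen] at hconn
      exact ⟨verts, hsub, by omega, by omega, by omega, hdeg,
        (pvDfs_reach adj verts _ (pvHead_mem verts hne) hnd).mp hconn⟩
    · rintro ⟨s, hsub, h5, h11, hodd, hdeg, hconn⟩
      have hnd := hsub.nodup (PySem.List.nodup_pyRange_one 0 m)
      have hne : s ≠ [] := by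
        intro h
        rw [h] at h5
        simp at h5
      have hLm : (s.length : Int) ≤ m := by
        have := hsub.length_le
        rw [PySem.List.length_pyRange_one] at this
        omega
      refine ⟨(s.length : Int), ?_, ?_⟩
      · rw [List.mem_filter]
        refine ⟨?_, by simpa using hLm⟩
        simp only [List.mem_cons, List.not_mem_nil, or_false]
        omega
      · rw [List.any_eq_true]
        refine ⟨s, ?_, ?_⟩
        · rw [PySem.List.mem_combinations_iff]
          exact ⟨hsub, by simp⟩
        · rw [Bool.and_eq_true, beq_iff_eq]
          refine ⟨hdeg, ?_⟩
          rw [Int.toNat_natCast]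
          exact (pvDfs_reach adj s _ (pvHead_mem s hne) hnd).mpr hconn

lemma pvHoleB_iff (adj : List (List Int)) (m : Int) :
    pvOddHoleAlt adj m = true ↔ pvHoleProp adj m := by
  unfold pvOddHoleAlt
  by_cases hm : 5 ≤ m
  · rw [show (decide (5 ≤ m)) = true from by simpa using hm, Bool.true_and]
    rw [pvSearch_iff adj (PySem.List.pyRange 0 m 1) [] (by simp)]
    constructor
    · rintro ⟨s, hsub, hlen, hgood⟩
      rw [List.nil_append] at hgood
      have hnd := hsub.nodup (PySem.List.nodup_pyRange_one 0 m)
      obtain ⟨h5, hodd, hdeg, hconn⟩ := (pvGood_iff adj s hnd).mp hgood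
      exact ⟨s, hsub, h5, by simpa using hlen, hodd, hdeg, hconn⟩
    · rintro ⟨s, hsub, h5, h11, hodd, hdeg, hconn⟩
      have hnd := hsub.nodup (PySem.List.nodup_pyRange_one 0 m)
      refine ⟨s, hsub, by simpa using h11, ?_⟩
      rw [List.nil_append]
      exact (pvGood_iff adj s hnd).mpr ⟨h5, hodd, hdeg, hconn⟩
  · rw [show (decide (5 ≤ m)) = false from by simpa using hm, Bool.false_and]
    simp only [Bool.false_eq_true, false_iff]
    intro h
    exact hm (pvHoleProp_ge adj m h)

theorem pv_hole_eq (adj : List (List Int)) (m : Int) :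
    pvHasOddHole adj m = pvOddHoleAlt adj m := by
  rw [Bool.eq_iff_iff, pvHoleA_iff, pvHoleB_iff]

-- ===== VERDICT (by name: the statement is the Claim_ definition above) =====
theorem is_perfect_spgt_spec : Claim_equal_is_perfect_spgt := by
  intro adj m _ _
  unfold Spec_is_perfect_spgt is_perfect_spgt is_perfect_spgt_alt
  rw [pv_hole_eq adj m, pv_hole_eq (pvComp adj m) m]
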